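-- pv_equiv track=rewrite | github.com/deepin-community/pkg-kde-tools | pythonlib/qmldeps.py | iter_part_over_version
-- ===== SOURCE A (Python) =====
-- def iter_part_over_version(part: str, version: str):
--     """ iter over version variants.
--
--     >>> gen = iter_part_over_version("test", "1.2")
--     >>> list(gen)
--     ["test.1.2",
--      "test.1",
--      "test"
--     ]
--     """
--     pos = None
--
--     v = version
--     while pos != -1:
--         v = v[:pos]
--         pos = v.rfind(".")
--         yield f"{part}.{v}"
--     yield part
-- ===== SOURCE B (Python) =====
-- def iter_part_over_version(part: str, version: str):
--     parts = version.split(".")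
--     for i in range(len(parts), 0, -1):
--         yield f"{part}." + ".".join(parts[:i])
--     yield part
-- ===== Notes on version B (the rewrite author's own statement) =====
-- stated objective: idiomatic
-- what changed: B splits the version once on '.' and re-joins indexed prefixes of the parts list, instead of A's repeated rfind-and-slice truncation of the string inside a while loop.
import Mathlib
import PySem

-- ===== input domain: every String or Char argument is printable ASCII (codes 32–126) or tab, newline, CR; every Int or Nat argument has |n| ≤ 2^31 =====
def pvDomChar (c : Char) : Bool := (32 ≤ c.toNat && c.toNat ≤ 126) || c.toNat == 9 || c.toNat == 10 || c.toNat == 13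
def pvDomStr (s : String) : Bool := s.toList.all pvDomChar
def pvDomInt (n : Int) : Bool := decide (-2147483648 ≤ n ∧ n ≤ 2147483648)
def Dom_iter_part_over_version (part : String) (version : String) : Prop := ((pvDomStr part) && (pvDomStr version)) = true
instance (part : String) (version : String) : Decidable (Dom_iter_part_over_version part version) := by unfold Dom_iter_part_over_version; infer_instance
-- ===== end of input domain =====

-- B re-implements A's repeated rfind-and-slice truncation loop as a one-time split on '.' followed by
-- re-joining indexed prefixes of the parts list (idiomatic; same asymptotic cost).
-- rfind bound, needed for termination of iterA
theorem rfindGo_bound (s : List Char) : ∀ j : Nat, PySem.Chars.rfind.go s ['.'] j = -1 ∨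
    (0 ≤ PySem.Chars.rfind.go s ['.'] j ∧ (PySem.Chars.rfind.go s ['.'] j).toNat < s.length) := by
  intro j
  induction j with
  | zero =>
    by_cases h : (['.'] : List Char).isPrefixOf s
    · right
      have hp : ['.'] <+: s := List.isPrefixOf_iff_prefix.mp h
      have : s ≠ [] := by rintro rfl; simpa using hp.length_le
      simp [PySem.Chars.rfind.go, h]
      cases s with
      | nil => simp at this
      | cons a l => simp
    · left; simp [PySem.Chars.rfind.go, h]
  | succ j ih =>
    by_cases h : (['.'] : List Char).isPrefixOf (s.drop (j+1))
    · right
      have hp : ['.'] <+: s.drop (j+1) := List.isPrefixOf_iff_prefix.mp h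
      have hne : s.drop (j+1) ≠ [] := by rintro he; rw [he] at hp; simpa using hp.length_le
      have : j + 1 < s.length := by
        by_contra hc
        exact hne (List.drop_eq_nil_of_le (by omega))
      simp [PySem.Chars.rfind.go, h]
      omega
    · simpa [PySem.Chars.rfind.go, h] using ih

theorem rfind_bound (s : List Char) : PySem.Chars.rfind s ['.'] = -1 ∨
    (0 ≤ PySem.Chars.rfind s ['.'] ∧ (PySem.Chars.rfind s ['.']).toNat < s.length) := by
  simpa [PySem.Chars.rfind] using rfindGo_bound s s.length

-- ===== PORT A =====
def iterA (part : List Char) (v : List Char) : List String :=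
  let pos := PySem.Chars.rfind v ['.']
  if h : pos = -1 then
    [String.ofList (part ++ '.' :: v), String.ofList part]
  else
    String.ofList (part ++ '.' :: v) :: iterA part (PySem.Chars.slice v none (some pos))
  termination_by v.length
  decreasing_by
    rcases rfind_bound v with h1 | ⟨h1, h2⟩
    · exact absurd h1 h
    · simp [PySem.Chars.slice_eq_listSlice, PySem.List.slice_to v h1, List.length_take]
      omega

def iter_part_over_version (part : String) (version : String) : List String :=
  iterA part.toList version.toList

-- ===== PORT B =====
def iterB (part : List Char) (parts : List (List Char)) : List String :=
  (PySem.List.pyRange parts.length 0 (-1)).map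
    (fun i => String.ofList (part ++ '.' :: PySem.Chars.join ['.'] (PySem.List.slice parts none (some i))))
  ++ [String.ofList part]

def iter_part_over_version_alt (part : String) (version : String) : List String :=
  iterB part.toList (PySem.Chars.splitOn version.toList ['.'])


-- ===== PRECONDITION & SPEC =====
def Spec_iter_part_over_version (part : String) (version : String) (out : List String) : Prop := out = iter_part_over_version_alt part version
instance (part : String) (version : String) (out : List String) : Decidable (Spec_iter_part_over_version part version out) := by unfold Spec_iter_part_over_version; infer_instance

-- ===== CLAIM (what is proved, stated in full; the proofs are below) =====
def Claim_equal_iter_part_over_version : Prop := ∀ (part : String) (version : String), Dom_iter_part_over_version part version → Spec_iter_part_over_version part version (iter_part_over_version part version)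

-- ===== LEMMAS AND PROOFS =====
-- reference splitter
def splRef : List Char → List (List Char)
  | [] => [[]]
  | c :: rest => if c = '.' then [] :: splRef rest else (splRef rest).modifyHead (c :: ·)

theorem splRef_ne_nil (l : List Char) : splRef l ≠ [] := by
  induction l with
  | nil => simp [splRef]
  | cons c rest ih =>
    by_cases h : c = '.'
    · simp [splRef, h]
    · simp only [splRef, if_neg h]
      cases hr : splRef rest with
      | nil => exact absurd hr ih
      | cons a t => simp

theorem splitOnGo_eq (fuel : Nat) : ∀ (l cur : List Char) (acc : List (List Char)), l.length < fuel →
    PySem.Chars.splitOn.go ['.'] fuel l cur acc = acc.reverse ++ (splRef l).modifyHead (cur.reverse ++ ·) := by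
  induction fuel with
  | zero => intro l cur acc h; omega
  | succ fuel ih =>
    intro l cur acc h
    cases l with
    | nil => simp [PySem.Chars.splitOn.go, splRef]
    | cons c rest =>
      by_cases hc : c = '.'
      · have hpre : (['.'] : List Char).isPrefixOf (c :: rest) = true := by simp [hc, List.isPrefixOf]
        rw [show PySem.Chars.splitOn.go ['.'] (fuel+1) (c :: rest) cur acc =
            PySem.Chars.splitOn.go ['.'] fuel ((c::rest).drop (['.'] : List Char).length) [] (cur.reverse :: acc) by
          simp [PySem.Chars.splitOn.go, hpre]]
        simp only [List.length_singleton, List.drop_succ_cons, List.drop_zero]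
        rw [ih rest [] (cur.reverse :: acc) (by simp at h ⊢; omega)]
        have hid : ∀ (xs : List (List Char)), xs.modifyHead (fun x => x) = xs := by
          intro xs; cases xs <;> rfl
        simp [splRef, hc, hid]
      · have hpre : (['.'] : List Char).isPrefixOf (c :: rest) = false := by
          simp [List.isPrefixOf]
          exact fun he => hc he.symm
        rw [show PySem.Chars.splitOn.go ['.'] (fuel+1) (c :: rest) cur acc =
            PySem.Chars.splitOn.go ['.'] fuel rest (c :: cur) acc by
          simp [PySem.Chars.splitOn.go, hpre]]
        rw [ih rest (c :: cur) acc (by simp at h ⊢; omega)]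
        simp only [splRef, if_neg hc]
        cases hr : splRef rest with
        | nil => exact absurd hr (splRef_ne_nil rest)
        | cons a t => simp

theorem splitOn_eq_splRef (l : List Char) : PySem.Chars.splitOn l ['.'] = splRef l := by
  rw [PySem.Chars.splitOn, splitOnGo_eq (l.length + 1) l [] [] (by omega)]
  cases hr : splRef l with
  | nil => exact absurd hr (splRef_ne_nil l)
  | cons a t => simp

theorem splRef_no_dot (l : List Char) (h : '.' ∉ l) : splRef l = [l] := by
  induction l with
  | nil => rfl
  | cons c rest ih =>
    have hc : c ≠ '.' := fun he => h (by simp [he])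
    rw [splRef, if_neg hc, ih (fun hm => h (by simp [hm]))]
    rfl

theorem splRef_last (u w : List Char) (hw : '.' ∉ w) : splRef (u ++ '.' :: w) = splRef u ++ [w] := by
  induction u with
  | nil => simp [splRef, splRef_no_dot w hw]
  | cons c u ih =>
    by_cases hc : c = '.'
    · simp [splRef, hc, ih]
    · simp only [List.cons_append, splRef, if_neg hc, ih]
      cases hr : splRef u with
      | nil => exact absurd hr (splRef_ne_nil u)
      | cons a t => simp

theorem join_splRef (l : List Char) : PySem.Chars.join ['.'] (splRef l) = l := by
  induction l with
  | nil => rfl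
  | cons c rest ih =>
    obtain ⟨a, t, hr⟩ : ∃ a t, splRef rest = a :: t := by
      cases hr : splRef rest with
      | nil => exact absurd hr (splRef_ne_nil rest)
      | cons a t => exact ⟨a, t, rfl⟩
    by_cases hc : c = '.'
    · rw [splRef, if_pos hc, hr, hc]
      rw [hr, ] at ih
      simpa [PySem.Chars.join, List.intercalate] using ih
    · rw [splRef, if_neg hc, hr]
      rw [hr] at ih
      cases t with
      | nil => simpa [PySem.Chars.join, List.intercalate] using ih
      | cons b t' =>
        rw [List.modifyHead_cons]
        simp only [PySem.Chars.join, List.intercalate] at ih ⊢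
        simp_all

theorem join_append_last (p : List (List Char)) (w : List Char) (hp : p ≠ []) :
    PySem.Chars.join ['.'] (p ++ [w]) = PySem.Chars.join ['.'] p ++ '.' :: w := by
  induction p with
  | nil => exact absurd rfl hp
  | cons a p ih =>
    cases p with
    | nil => simp [PySem.Chars.join, List.intercalate]
    | cons b q =>
      have := ih (by simp)
      simp only [PySem.Chars.join, List.intercalate] at this ⊢
      simp_all

theorem rfindGo_no_dot (s : List Char) (h : '.' ∉ s) : ∀ j : Nat, PySem.Chars.rfind.go s ['.'] j = -1 := by
  intro j
  induction j with
  | zero =>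
    have : ¬ (['.'] : List Char).isPrefixOf s := by
      intro hp
      rcases List.isPrefixOf_iff_prefix.mp hp with ⟨t, ht⟩
      exact h (by rw [← ht]; simp)
    simp [PySem.Chars.rfind.go, this]
  | succ j ih =>
    have : ¬ (['.'] : List Char).isPrefixOf (s.drop (j+1)) := by
      intro hp
      rcases List.isPrefixOf_iff_prefix.mp hp with ⟨t, ht⟩
      have : '.' ∈ s.drop (j+1) := by rw [← ht]; simp
      exact h (List.mem_of_mem_drop this)
    simpa [PySem.Chars.rfind.go, this] using ih

theorem rfind_no_dot (s : List Char) (h : '.' ∉ s) : PySem.Chars.rfind s ['.'] = -1 := by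
  simpa [PySem.Chars.rfind] using rfindGo_no_dot s h s.length

theorem rfindGo_last (u w : List Char) (hw : '.' ∉ w) : ∀ j : Nat, u.length ≤ j →
    PySem.Chars.rfind.go (u ++ '.' :: w) ['.'] j = u.length := by
  intro j
  induction j with
  | zero =>
    intro hj
    have hu : u = [] := List.eq_nil_of_length_eq_zero (by omega)
    subst hu
    simp [PySem.Chars.rfind.go, List.isPrefixOf]
  | succ j ih =>
    intro hj
    by_cases he : u.length = j + 1
    · have hdrop : (u ++ '.' :: w).drop (j+1) = '.' :: w := by
        rw [← he, List.drop_append_of_le_length (by omega)]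
        simp
      have : (['.'] : List Char).isPrefixOf ((u ++ '.' :: w).drop (j+1)) = true := by
        rw [hdrop]; simp [List.isPrefixOf]
      simp [PySem.Chars.rfind.go, he]
    · have hlt : u.length ≤ j := by omega
      have hdrop : (u ++ '.' :: w).drop (j+1) = w.drop (j - u.length) := by
        rw [List.drop_append]
        rw [List.drop_eq_nil_of_le (by omega : u.length ≤ j+1)]
        rw [show j + 1 - u.length = (j - u.length) + 1 by omega, List.drop_succ_cons, List.nil_append]
      have : ¬ (['.'] : List Char).isPrefixOf ((u ++ '.' :: w).drop (j+1)) := by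
        intro hp
        rcases List.isPrefixOf_iff_prefix.mp hp with ⟨t, ht⟩
        have : '.' ∈ (u ++ '.' :: w).drop (j+1) := by rw [← ht]; simp
        rw [hdrop] at this
        exact hw (List.mem_of_mem_drop this)
      simpa [PySem.Chars.rfind.go, this] using ih hlt

theorem rfind_last (u w : List Char) (hw : '.' ∉ w) :
    PySem.Chars.rfind (u ++ '.' :: w) ['.'] = u.length := by
  simpa [PySem.Chars.rfind] using rfindGo_last u w hw (u ++ '.' :: w).length (by simp)

theorem last_dot_decomp (v : List Char) (h : '.' ∈ v) : ∃ u w, v = u ++ '.' :: w ∧ '.' ∉ w := by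
  induction v with
  | nil => simp at h
  | cons c rest ih =>
    by_cases hr : '.' ∈ rest
    · obtain ⟨u, w, he, hw⟩ := ih hr
      exact ⟨c :: u, w, by rw [he]; rfl, hw⟩
    · have hc : c = '.' := by rcases List.mem_cons.mp h with h1 | h1; exact h1.symm; exact absurd h1 hr
      exact ⟨[], rest, by simp [hc], hr⟩

theorem pyRange_negOne (n : Nat) : PySem.List.pyRange (n : Int) 0 (-1) = (List.range n).map (fun k : Nat => (n : Int) - (k : Int)) := by
  cases n with
  | zero => rfl
  | succ m =>
    simp only [PySem.List.pyRange]
    rw [if_neg (by norm_num)]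
    have hlt : (0 : Int) < ((m+1 : Nat) : Int) := by positivity
    rw [if_neg (by norm_num), if_pos hlt]
    have hc : ((((m+1 : Nat) : Int) - 0 + -(-1) - 1) / -(-1)).toNat = m + 1 := by
      norm_num
    rw [hc]
    exact List.map_congr_left (fun k hk => by push_cast; ring)

theorem iterB_peel (part : List Char) (p : List (List Char)) (w : List Char) (hp : p ≠ []) :
    iterB part (p ++ [w]) =
      String.ofList (part ++ '.' :: PySem.Chars.join ['.'] (p ++ [w])) :: iterB part p := by
  unfold iterB
  rw [List.length_append, List.length_singleton]
  rw [show ((p.length + 1 : Nat) : Int) = (((p.length + 1 : Nat) : Nat) : Int) by norm_num]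
  rw [pyRange_negOne (p.length + 1), pyRange_negOne p.length]
  rw [List.range_succ_eq_map]
  simp only [List.map_cons, List.map_map, Nat.cast_zero, sub_zero, List.cons_append]
  congr 1
  · congr 3
    rw [PySem.List.slice_to (p ++ [w]) (Int.natCast_nonneg (p.length + 1)), Int.toNat_natCast]
    congr 1
    exact List.take_of_length_le (by simp)
  · congr 1
    refine List.map_congr_left (fun k hk => ?_)
    have hk' : k < p.length := List.mem_range.mp hk
    simp only [Function.comp]
    congr 3
    have he1 : ((p.length + 1 : Nat) : Int) - ((k.succ : Nat) : Int) = ((p.length - k : Nat) : Int) := by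
      omega
    have he2 : ((p.length : Nat) : Int) - ((k : Nat) : Int) = ((p.length - k : Nat) : Int) := by
      omega
    rw [he1, he2]
    rw [PySem.List.slice_to (p ++ [w]) (Int.natCast_nonneg (p.length - k)),
      PySem.List.slice_to p (Int.natCast_nonneg (p.length - k)), Int.toNat_natCast]
    congr 1
    exact List.take_append_of_le_length (by omega)

theorem iterA_eq_iterB (part : List Char) : ∀ (n : Nat) (v : List Char), v.length = n →
    iterA part v = iterB part (splRef v) := by
  intro n
  induction n using Nat.strong_induction_on with
  | _ n ih =>
  intro v hn
  by_cases h : '.' ∈ v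
  · obtain ⟨u, w, rfl, hw⟩ := last_dot_decomp v h
    rw [iterA]
    have hr : PySem.Chars.rfind (u ++ '.' :: w) ['.'] = (u.length : Int) := rfind_last u w hw
    rw [hr]
    rw [dif_neg (by omega)]
    have hsl : PySem.List.slice (u ++ '.' :: w) none (some (u.length : Int)) = u := by
      rw [PySem.List.slice_to (u ++ '.' :: w) (Int.natCast_nonneg u.length), Int.toNat_natCast]
      rw [List.take_append_of_le_length (le_refl _), List.take_length]
    simp only [PySem.Chars.slice_eq_listSlice, hsl]
    rw [ih u.length (by simp at hn ⊢; omega) u rfl]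
    rw [splRef_last u w hw, iterB_peel part (splRef u) w (splRef_ne_nil u)]
    rw [join_append_last _ _ (splRef_ne_nil u), join_splRef]
  · rw [iterA]
    rw [rfind_no_dot v h, dif_pos rfl]
    rw [splRef_no_dot v h]
    show _ = iterB part [v]
    unfold iterB
    rw [List.length_singleton]
    rw [pyRange_negOne 1]
    simp only [List.range_one, List.map_cons, List.map_nil, Nat.cast_zero, sub_zero]
    rw [PySem.List.slice_to [v] (Int.natCast_nonneg 1), Int.toNat_natCast]
    simp [PySem.Chars.join, List.intercalate]

-- ===== VERDICT (by name: the statement is the Claim_ definition above) =====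
theorem iter_part_over_version_spec : Claim_equal_iter_part_over_version := by
  intro part version _
  show iter_part_over_version part version = iter_part_over_version_alt part version
  unfold iter_part_over_version iter_part_over_version_alt
  rw [splitOn_eq_splRef]
  exact iterA_eq_iterB part.toList version.toList.length version.toList rfl
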